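-- pv_equiv track=rewrite | github.com/ghleokim/algorithm | 200929/test.py | solution
-- ===== SOURCE A (Python) =====
-- def solution(S):
--     # write your code in Python 3.6
--     answer = 0
--     N = len(S)
--     i = 0
--     consecutive_a = 0
--     has_substring_aaa = False
--
--     while i < N:
--
--         if S[i] == 'a':
--             consecutive_a += 1
--         else:
--             answer += 2 - consecutive_a
--             consecutive_a = 0
--
--         if consecutive_a == 3:
--             return -1
--
--         i += 1
--
--     answer += 2 - consecutive_a
--
--     return answer
-- ===== SOURCE B (Python) =====
-- def solution(S):
--     # closed form: score is -1 iff "aaa" occurs; else 2*len(S) - 3*(#'a') + 2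
--     if 'aaa' in S:
--         return -1
--     return 2 * len(S) - 3 * S.count('a') + 2
-- ===== Notes on version B (the rewrite author's own statement) =====
-- stated objective: simpler
-- what changed: Replaced the stateful scan that accumulates 2-minus-run-length per run with an independent 'aaa' substring validity check plus the closed-form formula 2*len(S) - 3*S.count('a') + 2.
import Mathlib
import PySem

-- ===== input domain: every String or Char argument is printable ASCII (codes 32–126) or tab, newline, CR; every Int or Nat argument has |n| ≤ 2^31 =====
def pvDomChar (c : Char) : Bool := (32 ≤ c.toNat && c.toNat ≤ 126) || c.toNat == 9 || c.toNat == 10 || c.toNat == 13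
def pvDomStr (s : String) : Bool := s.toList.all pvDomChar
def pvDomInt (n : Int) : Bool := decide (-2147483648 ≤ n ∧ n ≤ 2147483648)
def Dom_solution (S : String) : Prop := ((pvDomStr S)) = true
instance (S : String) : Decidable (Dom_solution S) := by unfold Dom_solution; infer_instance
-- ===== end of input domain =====

-- B replaces A's run-accumulating scan by an "aaa"-substring check plus a closed-form count formula (simpler).

-- ===== PORT A =====
-- the while loop of A: state (answer, consecutive_a); early return -1 when a run reaches 3
def solLoop : List Char → Int → Int → Int
  | [], ans, cons => ans + (2 - cons)
  | c :: rest, ans, cons =>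
      let cons' := if c = 'a' then cons + 1 else 0
      let ans'  := if c = 'a' then ans else ans + (2 - cons)
      if cons' = 3 then -1 else solLoop rest ans' cons'

def solution (S : String) : Int := solLoop S.toList 0 0

-- ===== PORT B =====
def solution_alt (S : String) : Int :=
  if PySem.Str.isIn "aaa" S then -1
  else 2 * PySem.Str.len S - 3 * (PySem.Str.count S "a" : Int) + 2

-- ===== PRECONDITION & SPEC =====
def Spec_solution (S : String) (out : Int) : Prop := out = solution_alt S
instance (S : String) (out : Int) : Decidable (Spec_solution S out) := by unfold Spec_solution; infer_instance

-- ===== CLAIM (what is proved, stated in full; the proofs are below) =====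
def Claim_equal_solution : Prop := ∀ (S : String), Dom_solution S → Spec_solution S (solution S)

-- ===== LEMMAS AND PROOFS =====

-- whether A's scan, started with k pending 'a's, will hit a run of three
def badFrom : Nat → List Char → Bool
  | _, [] => false
  | k, c :: rest => if c = 'a' then (k + 1 == 3) || badFrom (k + 1) rest else badFrom 0 rest

theorem solLoop_eq (l : List Char) : ∀ (ans : Int) (k : Nat), k ≤ 2 →
    solLoop l ans (k : Int) =
      if badFrom k l then -1
      else ans + 2 * l.length - 3 * (l.count 'a' : Int) + 2 - k := by
  induction l with
  | nil => intro ans k hk; simp [solLoop, badFrom]; ring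
  | cons c rest ih =>
      intro ans k hk
      by_cases hc : c = 'a'
      · subst hc
        by_cases h3 : k = 2
        · subst h3; simp [solLoop, badFrom]
        · have hk1 : k + 1 ≤ 2 := by omega
          simp only [solLoop, badFrom, reduceIte]
          have hne : ¬ ((k : Int) + 1 = 3) := by omega
          have hne' : (k + 1 == 3) = false := by simp; omega
          rw [if_neg hne, show ((k : Int) + 1) = ((k + 1 : Nat) : Int) by push_cast; ring,
              ih ans (k + 1) hk1, hne']
          simp only [Bool.false_or]
          split
          · rfl
          · simp
            ring
      · simp only [solLoop, badFrom, if_neg hc]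
        rw [show (0 : Int) = ((0 : Nat) : Int) from rfl, ih (ans + (2 - (k : Int))) 0 (by omega)]
        rw [if_neg (by norm_num : ¬ (((0 : Nat) : Int) = 3))]
        split
        · rfl
        · simp [hc]
          ring

theorem badFrom_iff (l : List Char) : ∀ (k : Nat), k ≤ 2 →
    (badFrom k l = true ↔ List.replicate (3 - k) 'a' <+: l ∨ ['a','a','a'] <:+: l) := by
  induction l with
  | nil =>
      intro k hk
      constructor
      · intro h'; simp [badFrom] at h'
      · rintro (hp | hi)
        · rcases hp with ⟨t, ht⟩
          have := congrArg List.length ht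
          simp [List.length_replicate] at this
          omega
        · rcases hi with ⟨s, t, ht⟩
          have := congrArg List.length ht
          simp at this
  | cons c rest ih =>
      intro k hk
      by_cases hc : c = 'a'
      · subst hc
        by_cases h3 : k = 2
        · subst h3
          simp only [badFrom, reduceIte]
          constructor
          · intro _
            left
            show List.replicate 1 'a' <+: _
            exact ⟨rest, rfl⟩
          · intro _; rfl
        · have hk1 : k + 1 ≤ 2 := by omega
          simp only [badFrom, reduceIte]
          have hne : (k + 1 == 3) = false := by simp; omega
          rw [hne]
          simp only [Bool.false_or]
          rw [ih (k + 1) hk1]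
          have hrep : List.replicate (3 - k) 'a' = 'a' :: List.replicate (3 - (k + 1)) 'a' := by
            have h : 3 - k = (3 - (k + 1)) + 1 := by omega
            rw [h, List.replicate_succ]
          constructor
          · rintro (hp | hi)
            · left
              rcases hp with ⟨t, rfl⟩
              exact ⟨t, by rw [hrep, List.cons_append]⟩
            · right; exact List.infix_cons_iff.mpr (Or.inr hi)
          · rintro (hp | hi)
            · left
              rw [hrep] at hp
              exact (List.cons_prefix_cons.mp hp).2
            · rcases List.infix_cons_iff.mp hi with hp | hi'
              · left
                have h2 : ['a','a'] <+: rest := (List.cons_prefix_cons.mp hp).2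
                have h12 : 3 - (k + 1) = 1 ∨ 3 - (k + 1) = 2 := by omega
                have hsub : List.replicate (3 - (k + 1)) 'a' <+: ['a','a'] := by
                  rcases h12 with h | h <;> rw [h] <;> decide
                exact hsub.trans h2
              · right; exact hi'
      · simp only [badFrom, if_neg hc]
        rw [ih 0 (by omega)]
        constructor
        · rintro (hp | hi)
          · right
            exact List.infix_cons_iff.mpr (Or.inr hp.isInfix)
          · right; exact List.infix_cons_iff.mpr (Or.inr hi)
        · rintro (hp | hi)
          · exfalso
            rcases hp with ⟨t, ht⟩
            have h : 3 - k = (3 - k - 1) + 1 := by omega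
            rw [h, List.replicate_succ] at ht
            exact hc (List.cons.inj ht).1.symm
          · rcases List.infix_cons_iff.mp hi with hp | hi'
            · exfalso
              rcases hp with ⟨t, ht⟩
              exact hc (List.cons.inj ht).1.symm
            · right; exact hi'

theorem count_go_singleton (fuel : Nat) : ∀ (l : List Char) (acc : Nat), l.length ≤ fuel →
    PySem.Chars.count.go ['a'] fuel l acc = acc + l.count 'a' := by
  induction fuel with
  | zero =>
      intro l acc h
      have : l = [] := List.length_eq_zero_iff.mp (by omega)
      subst this
      simp [PySem.Chars.count.go]
  | succ n ih =>
      intro l acc h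
      cases l with
      | nil => simp [PySem.Chars.count.go]
      | cons c t =>
          by_cases hc : c = 'a'
          · subst hc
            rw [show PySem.Chars.count.go ['a'] (n + 1) ('a' :: t) acc
                  = PySem.Chars.count.go ['a'] n t (acc + 1) by
                  rw [PySem.Chars.count.go]; simp [List.isPrefixOf]]
            rw [ih t (acc + 1) (by simp at h; omega)]
            simp; omega
          · rw [show PySem.Chars.count.go ['a'] (n + 1) (c :: t) acc
                  = PySem.Chars.count.go ['a'] n t acc by
                  rw [PySem.Chars.count.go,
                      show (['a'] : List Char).isPrefixOf (c :: t) = false by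
                        simp [List.isPrefixOf]; exact fun h' => hc h'.symm]
                  rw [if_neg (by simp : ¬ (false = true))]]
            rw [ih t acc (by simp at h; omega)]
            simp [hc]

theorem str_count_a (S : String) : PySem.Str.count S "a" = S.toList.count 'a' := by
  rw [PySem.Str.count_eq]
  have h : PySem.Chars.count S.toList "a".toList
      = PySem.Chars.count.go ['a'] S.toList.length S.toList 0 := rfl
  rw [h, count_go_singleton S.toList.length S.toList 0 (le_refl _)]
  omega

-- ===== VERDICT (by name: the statement is the Claim_ definition above) =====
theorem solution_spec : Claim_equal_solution := by
  intro S _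
  unfold Spec_solution solution solution_alt
  rw [show (0 : Int) = ((0 : Nat) : Int) from rfl,
      solLoop_eq S.toList ((0 : Nat) : Int) 0 (by omega)]
  rw [PySem.Str.len_eq, str_count_a]
  by_cases hb : badFrom 0 S.toList
  · rw [if_pos hb]
    have hd := (badFrom_iff S.toList 0 (by omega)).mp hb
    have hin : PySem.Str.isIn "aaa" S = true := by
      rw [PySem.Str.isIn_iff_infix]
      rcases hd with hp | hi
      · exact hp.isInfix
      · exact hi
    rw [if_pos hin]
  · rw [if_neg (by simp [hb])]
    have hin : ¬ (PySem.Str.isIn "aaa" S = true) := by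
      intro h
      exact hb ((badFrom_iff S.toList 0 (by omega)).mpr
        (Or.inr ((PySem.Str.isIn_iff_infix _ _).mp h)))
    rw [if_neg hin]
    push_cast; ring
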